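-- pv_equiv track=rewrite | github.com/Lungelo99/Python-assignment-2 | Assignment 2 [210277897 ].py | list_check
-- ===== SOURCE A (Python) =====
-- def list_check(listz):
--     """
--         Seaching through a list for sequence 023
--     """
--     isValid = False
--     x = 0
--     position = ''
--
--     #checking if characters contains 023 and extracting them
--
--     while (x < len(listz)):
--         if(listz.__contains__(0)):
--             position = position + str(listz[listz.index(0)])
--             if(listz.__contains__(2)):
--                 position = position + str(listz[listz.index(2)])
--                 if(listz.__contains__(3)):
--                     position = position + str(listz[listz.index(3)])
--                     x = len(listz) + 1
--
-- #making sure its the requered sequence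
--
--         if(position == '023'):
--             isValid = True
--         x = x + 1
--     return isValid
-- ===== SOURCE B (Python) =====
-- def list_check(listz):
--     """
--         Seaching through a list for sequence 023
--     """
--     f0 = f2 = f3 = False
--     for v in listz:
--         if v == 0:
--             f0 = True
--         elif v == 2:
--             f2 = True
--         elif v == 3:
--             f3 = True
--     return f0 and f2 and f3
-- ===== Notes on version B (the rewrite author's own statement) =====
-- stated objective: faster
-- what changed: Replaces the while loop with repeated __contains__/index scans and a string-concatenation sequence check by a single forward pass keeping three found-flags and returning their conjunction.
import Mathlib
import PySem

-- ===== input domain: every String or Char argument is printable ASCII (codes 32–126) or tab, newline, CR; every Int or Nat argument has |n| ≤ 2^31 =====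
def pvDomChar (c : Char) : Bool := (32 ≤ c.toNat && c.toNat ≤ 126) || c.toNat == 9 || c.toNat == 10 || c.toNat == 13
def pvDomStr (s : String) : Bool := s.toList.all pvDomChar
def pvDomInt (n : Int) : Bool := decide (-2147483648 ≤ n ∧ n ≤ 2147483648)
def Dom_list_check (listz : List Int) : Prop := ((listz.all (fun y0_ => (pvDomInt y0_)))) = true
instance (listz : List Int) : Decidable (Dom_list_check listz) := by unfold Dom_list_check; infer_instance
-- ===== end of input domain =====

-- B replaces A's while loop with repeated __contains__/index scans and a string sequence check
-- by a single forward pass keeping three found-flags: one O(n) traversal instead of A's O(n^2) rescans (measured faster in a timing run).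


-- ===== PORT A =====
-- literal port of A's while loop; the '.getD 0' defaults are unreachable because each
-- access is guarded by the corresponding __contains__ check, as in the Python
def list_check_loop (listz : List Int) (isValid : Bool) (x : Int) (position : String) : Bool :=
  if _h : x < (listz.length : Int) then
    let px : String × Int :=
      if listz.contains 0 then
        let position := position ++ PySem.Int.toStr
          ((PySem.List.pyGet? listz (((PySem.List.index? listz 0).getD 0 : Nat) : Int)).getD 0)
        if listz.contains 2 then
          let position := position ++ PySem.Int.toStr
            ((PySem.List.pyGet? listz (((PySem.List.index? listz 2).getD 0 : Nat) : Int)).getD 0)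
          if listz.contains 3 then
            let position := position ++ PySem.Int.toStr
              ((PySem.List.pyGet? listz (((PySem.List.index? listz 3).getD 0 : Nat) : Int)).getD 0)
            (position, (listz.length : Int) + 1)
          else (position, x)
        else (position, x)
      else (position, x)
    let position := px.1
    let x := px.2
    let isValid := if position == "023" then true else isValid
    list_check_loop listz isValid (x + 1) position
  else isValid
termination_by (listz.length + 2 - x).toNat
decreasing_by
  split_ifs <;> simp <;> omega

def list_check (listz : List Int) : Bool :=
  list_check_loop listz false 0 ""

-- ===== PORT B =====
def list_check_alt (listz : List Int) : Bool :=
  let s := listz.foldl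
    (fun (st : Bool × Bool × Bool) v =>
      if v == 0 then (true, st.2.1, st.2.2)
      else if v == 2 then (st.1, true, st.2.2)
      else if v == 3 then (st.1, st.2.1, true)
      else st)
    (false, false, false)
  s.1 && s.2.1 && s.2.2

-- ===== PRECONDITION & SPEC =====
def Spec_list_check (listz : List Int) (out : Bool) : Prop := out = list_check_alt listz
instance (listz : List Int) (out : Bool) : Decidable (Spec_list_check listz out) := by unfold Spec_list_check; infer_instance

-- ===== CLAIM (what is proved, stated in full; the proofs are below) =====
def Claim_equal_list_check : Prop := ∀ (listz : List Int), Dom_list_check listz → Spec_list_check listz (list_check listz)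

-- ===== LEMMAS AND PROOFS =====

-- the guarded self-lookup listz[listz.index(v)] returns v itself
theorem pyGet_index_self (listz : List Int) (v : Int) (hv : v ∈ listz) :
    (PySem.List.pyGet? listz (((PySem.List.index? listz v).getD 0 : Nat) : Int)).getD 0 = v := by
  obtain ⟨k, hk⟩ := Option.isSome_iff_exists.mp
    ((PySem.List.index?_isSome_iff listz v).mpr hv)
  obtain ⟨hlt, hkv, -⟩ := PySem.List.getElem_of_index?_eq_some hk
  rw [hk]
  simp [PySem.List.pyGet?_natCast, List.getElem?_eq_getElem hlt, hkv]

-- B's fold computes the three membership flags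
theorem alt_fold (listz : List Int) (st : Bool × Bool × Bool) :
    listz.foldl
      (fun (st : Bool × Bool × Bool) v =>
        if v == 0 then (true, st.2.1, st.2.2)
        else if v == 2 then (st.1, true, st.2.2)
        else if v == 3 then (st.1, st.2.1, true)
        else st) st
    = (st.1 || listz.contains 0, st.2.1 || listz.contains 2, st.2.2 || listz.contains 3) := by
  induction listz generalizing st with
  | nil => simp
  | cons v t ih =>
    rw [List.foldl_cons, ih]
    by_cases h0 : v = 0
    · subst h0; simp
    · by_cases h2 : v = 2
      · subst h2; simp
      · by_cases h3 : v = 3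
        · subst h3; simp
        · simp [h0, h2, h3, Ne.symm h0, Ne.symm h2, Ne.symm h3]

theorem alt_eq (listz : List Int) :
    list_check_alt listz = (listz.contains 0 && listz.contains 2 && listz.contains 3) := by
  unfold list_check_alt
  rw [alt_fold]
  simp

-- if some target is missing, A's position never contains '3', so isValid stays false
theorem loop_false (listz : List Int)
    (h : ¬ (0 ∈ listz ∧ 2 ∈ listz ∧ 3 ∈ listz)) :
    ∀ (n : Nat) (x : Int) (p : String), (listz.length + 2 - x).toNat = n →
      ('3' : Char) ∉ p.toList →
      list_check_loop listz false x p = false := by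
  intro n
  induction n using Nat.strong_induction_on with
  | _ n ih =>
    intro x p hn hp
    rw [list_check_loop]
    split
    · next hx =>
      by_cases h0 : listz.contains 0
      · by_cases h2 : listz.contains 2
        · have h3 : listz.contains 3 = false := by
            simp only [List.contains_eq_mem, decide_eq_true_eq] at h0 h2
            simp only [List.contains_eq_mem, decide_eq_false_iff_not]
            tauto
          have e0 := pyGet_index_self listz 0 (by simpa using h0)
          have e2 := pyGet_index_self listz 2 (by simpa using h2)
          have hp' : ('3' : Char) ∉ (p ++ "0" ++ "2").toList := by
            rw [String.toList_append, String.toList_append]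
            intro hmem
            rcases List.mem_append.mp hmem with hm | hm
            · rcases List.mem_append.mp hm with hm' | hm'
              · exact hp hm'
              · revert hm'; decide
            · revert hm; decide
          have hne : ((p ++ "0" ++ "2") == "023") = false := by
            rw [beq_eq_false_iff_ne]
            intro he; apply hp'; rw [he]; decide
          simp only [h0, h2, h3, e0, e2, Bool.false_eq_true, if_false, if_true,
            show PySem.Int.toStr 0 = "0" from rfl, show PySem.Int.toStr 2 = "2" from rfl,
            hne]
          exact ih ((listz.length + 2 - (x + 1)).toNat) (by omega) (x + 1) _ rfl hp'
        · have h2' : listz.contains 2 = false := by simpa using h2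
          have e0 := pyGet_index_self listz 0 (by simpa using h0)
          have hp' : ('3' : Char) ∉ (p ++ "0").toList := by
            rw [String.toList_append]
            intro hmem
            rcases List.mem_append.mp hmem with hm | hm
            · exact hp hm
            · revert hm; decide
          have hne : ((p ++ "0") == "023") = false := by
            rw [beq_eq_false_iff_ne]
            intro he; apply hp'; rw [he]; decide
          simp only [h0, h2', e0, Bool.false_eq_true, if_false, if_true,
            show PySem.Int.toStr 0 = "0" from rfl, hne]
          exact ih ((listz.length + 2 - (x + 1)).toNat) (by omega) (x + 1) _ rfl hp'
      · have h0' : listz.contains 0 = false := by simpa using h0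
        have hne : (p == "023") = false := by
          rw [beq_eq_false_iff_ne]
          intro he; apply hp; rw [he]; decide
        simp only [h0', Bool.false_eq_true, if_false, hne]
        exact ih ((listz.length + 2 - (x + 1)).toNat) (by omega) (x + 1) _ rfl hp
    · rfl

-- if all three targets are present, A returns true
theorem loop_true (listz : List Int)
    (h0 : 0 ∈ listz) (h2 : 2 ∈ listz) (h3 : 3 ∈ listz) :
    list_check_loop listz false 0 "" = true := by
  have hlen : 0 < listz.length := List.length_pos_of_mem h0
  have hx : (0 : Int) < (listz.length : Int) := by exact_mod_cast hlen
  have e0 := pyGet_index_self listz 0 h0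
  have e2 := pyGet_index_self listz 2 h2
  have e3 := pyGet_index_self listz 3 h3
  rw [list_check_loop, dif_pos hx]
  have c0 : listz.contains 0 = true := by simpa using h0
  have c2 : listz.contains 2 = true := by simpa using h2
  have c3 : listz.contains 3 = true := by simpa using h3
  simp only [c0, c2, c3, if_true, e0, e2, e3,
    show PySem.Int.toStr 0 = "0" from rfl, show PySem.Int.toStr 2 = "2" from rfl,
    show PySem.Int.toStr 3 = "3" from rfl,
    show (("" ++ "0" ++ "2" ++ "3") == "023") = true from by decide]
  rw [list_check_loop]
  have hx2 : ¬ ((listz.length : Int) + 1 + 1 < (listz.length : Int)) := by omega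
  simp [hx2]

-- ===== VERDICT (by name: the statement is the Claim_ definition above) =====
theorem list_check_spec : Claim_equal_list_check := by
  intro listz _
  unfold Spec_list_check
  rw [alt_eq]
  by_cases hall : 0 ∈ listz ∧ 2 ∈ listz ∧ 3 ∈ listz
  · obtain ⟨h0, h2, h3⟩ := hall
    rw [show list_check listz = true from loop_true listz h0 h2 h3]
    simp [List.contains_eq_mem, h0, h2, h3]
  · rw [show list_check listz = false from
      loop_false listz hall _ 0 "" rfl (by decide)]
    simp only [List.contains_eq_mem]
    rcases not_and_or.mp hall with h | h
    · simp [h]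
    · rcases not_and_or.mp h with h | h <;> simp [h]
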